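-- pv_equiv track=rewrite | github.com/Nicol7896/OsbraAI | Cod_Principal/osbra_final_perfecto.py | summarize_with_gemini
-- ===== SOURCE A (Python) =====
-- def summarize_with_gemini(text, max_length=100):
--     """Simula resumen con Gemini usando extracción inteligente"""
--     # Dividir en oraciones
--     sentences = text.split('.')
--
--     # Identificar la oración más importante
--     important_sentences = []
--     for sentence in sentences:
--         sentence = sentence.strip()
--         if len(sentence) > 10:  # Filtrar oraciones muy cortas
--             # Puntuación basada en palabras clave
--             score = 0
--             keywords = ['problema', 'falta', 'necesitamos', 'requerimos', 'urgente', 'importante']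
--             for keyword in keywords:
--                 if keyword in sentence.lower():
--                     score += 1
--             important_sentences.append((sentence, score))
--
--     # Ordenar por importancia
--     important_sentences.sort(key=lambda x: x[1], reverse=True)
--
--     # Construir resumen
--     summary = ""
--     for sentence, _ in important_sentences[:2]:  # Tomar las 2 más importantes
--         if len(summary + sentence) < max_length:
--             if summary:
--                 summary += ". " + sentence
--             else:
--                 summary = sentence
--         else:
--             break
--
--     # Si no hay resumen, tomar el inicio del texto
--     if not summary:
--         summary = text[:max_length]
--
--     return summary
-- ===== SOURCE B (Python) =====
-- def summarize_with_gemini(text, max_length=100):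
--     """Single streaming pass: keep the two best-scoring sentences (stable,
--     earlier sentence wins ties) without materialising or sorting a list."""
--     keywords = ('problema', 'falta', 'necesitamos', 'requerimos', 'urgente', 'importante')
--     best = None
--     second = None
--     for raw in text.split('.'):
--         s = raw.strip()
--         if len(s) > 10:
--             low = s.lower()
--             sc = sum(k in low for k in keywords)
--             if best is None or best[1] < sc:
--                 best, second = (s, sc), best
--             elif second is None or second[1] < sc:
--                 second = (s, sc)
--     if best is not None and len(best[0]) < max_length:
--         summary = best[0]
--         if second is not None and len(summary) + len(second[0]) < max_length:
--             summary += ". " + second[0]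
--         return summary
--     return text[:max_length]
-- ===== Notes on version B (the rewrite author's own statement) =====
-- stated objective: alternative
-- what changed: Instead of building a list of scored sentences, stable-sorting it by score and folding a break-loop over its first two entries, B makes one streaming pass over the sentences that maintains only the current top-2 (strict comparisons reproduce the stable reverse sort's earlier-on-tie order) and assembles the summary from those at most two sentences with direct conditionals.
import Mathlib
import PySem

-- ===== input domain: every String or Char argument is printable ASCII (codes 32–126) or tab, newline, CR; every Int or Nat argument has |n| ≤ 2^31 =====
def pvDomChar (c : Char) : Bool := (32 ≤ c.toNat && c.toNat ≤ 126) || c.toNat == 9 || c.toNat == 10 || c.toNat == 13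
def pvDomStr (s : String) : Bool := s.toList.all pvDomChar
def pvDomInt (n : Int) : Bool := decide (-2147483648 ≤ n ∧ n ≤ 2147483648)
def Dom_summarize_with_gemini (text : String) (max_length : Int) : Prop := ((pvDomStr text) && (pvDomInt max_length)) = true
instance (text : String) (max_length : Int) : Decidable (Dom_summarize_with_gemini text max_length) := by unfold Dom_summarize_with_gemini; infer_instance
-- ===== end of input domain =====

-- B replaces A's build-list/stable-reverse-sort/take-2 pipeline by one streaming pass that
-- maintains only the current top-2 scored sentences; same return value (alternative, not faster).
-- Both ports work on `text.toList` with PySem.Chars primitives (exact counterparts of the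
-- Python str methods on the stated ASCII domain) and rebuild a String at the very end.

-- ===== PORT A =====
def swgKeywords : List (List Char) :=
  ["problema".toList, "falta".toList, "necesitamos".toList,
   "requerimos".toList, "urgente".toList, "importante".toList]

-- A's inner keyword loop: score = 0; for keyword in keywords: if keyword in sentence.lower(): score += 1
def swgScoreA (s : List Char) : Int :=
  swgKeywords.foldl (fun score k => if PySem.Chars.isIn k (PySem.Chars.lower s) then score + 1 else score) 0

-- A's summary-building loop (with its `break`, hence structural recursion)
def swgBuild (max_length : Int) : List (List Char × Int) → List Char → List Char
  | [], summary => summary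
  | (sentence, _) :: rest, summary =>
    if ((summary ++ sentence).length : Int) < max_length then
      if summary.isEmpty then swgBuild max_length rest sentence
      else swgBuild max_length rest (summary ++ ('.' :: ' ' :: sentence))
    else summary

def summarize_with_gemini (text : String) (max_length : Int) : String :=
  let sentences := PySem.Chars.splitOn text.toList ['.']
  let important_sentences := sentences.foldl (fun acc sentence =>
      let s := PySem.Chars.strip sentence
      if 10 < s.length then acc ++ [(s, swgScoreA s)] else acc)
    ([] : List (List Char × Int))
  let sortedSentences := PySem.List.sorted important_sentences (fun x => x.2) true
  let summary := swgBuild max_length (sortedSentences.take 2) []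
  if summary.isEmpty then String.ofList (PySem.Chars.slice text.toList none (some max_length))
  else String.ofList summary

-- ===== PORT B =====
-- B's score: sum(k in low for k in keywords)
def swgScoreB (low : List Char) : Int :=
  (swgKeywords.map (fun k => if PySem.Chars.isIn k low then (1 : Int) else 0)).sum

-- B's loop body: strip, filter, score, update the maintained top-2 (strict comparisons)
def swgStep (st : Option (List Char × Int) × Option (List Char × Int)) (raw : List Char) :
    Option (List Char × Int) × Option (List Char × Int) :=
  let s := PySem.Chars.strip raw
  if 10 < s.length then
    let sc := swgScoreB (PySem.Chars.lower s)
    match st with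
    | (none, _) => (some (s, sc), none)
    | (some b, second) =>
      if b.2 < sc then (some (s, sc), some b)
      else
        match second with
        | none => (some b, some (s, sc))
        | some s2 => if s2.2 < sc then (some b, some (s, sc)) else (some b, some s2)
  else st

def summarize_with_gemini_alt (text : String) (max_length : Int) : String :=
  let st := (PySem.Chars.splitOn text.toList ['.']).foldl swgStep (none, none)
  match st with
  | (some b, second) =>
    if (b.1.length : Int) < max_length then
      match second with
      | some s2 =>
        if ((b.1.length + s2.1.length : Nat) : Int) < max_length then
          String.ofList (b.1 ++ ('.' :: ' ' :: s2.1))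
        else String.ofList b.1
      | none => String.ofList b.1
    else String.ofList (PySem.Chars.slice text.toList none (some max_length))
  | (none, _) => String.ofList (PySem.Chars.slice text.toList none (some max_length))

-- ===== PRECONDITION & SPEC =====
def Spec_summarize_with_gemini (text : String) (max_length : Int) (out : String) : Prop := out = summarize_with_gemini_alt text max_length
instance (text : String) (max_length : Int) (out : String) : Decidable (Spec_summarize_with_gemini text max_length out) := by unfold Spec_summarize_with_gemini; infer_instance

-- ===== CLAIM (what is proved, stated in full; the proofs are below) =====
def Claim_equal_summarize_with_gemini : Prop := ∀ (text : String) (max_length : Int), Dom_summarize_with_gemini text max_length → Spec_summarize_with_gemini text max_length (summarize_with_gemini text max_length)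

-- ===== LEMMAS AND PROOFS =====

-- the per-sentence "admit and score" filter shared by both loops
def swgF (raw : List Char) : Option (List Char × Int) :=
  let s := PySem.Chars.strip raw
  if 10 < s.length then some (s, swgScoreA s) else none

-- the pure top-2 step on already-scored entries
def swgTop2 (st : Option (List Char × Int) × Option (List Char × Int)) (x : List Char × Int) :
    Option (List Char × Int) × Option (List Char × Int) :=
  match st with
  | (none, _) => (some x, none)
  | (some b, second) =>
    if b.2 < x.2 then (some x, some b)
    else
      match second with
      | none => (some b, some x)
      | some s2 => if s2.2 < x.2 then (some b, some x) else (some b, some s2)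

def swgStList (st : Option (List Char × Int) × Option (List Char × Int)) : List (List Char × Int) :=
  match st with
  | (none, _) => []
  | (some b, none) => [b]
  | (some b, some s2) => [b, s2]

theorem swgFoldl_ite_one (p : List Char → Bool) (l : List (List Char)) (c : Int) :
    l.foldl (fun sc k => if p k then sc + 1 else sc) c
      = c + (l.map (fun k => if p k then (1 : Int) else 0)).sum := by
  induction l generalizing c with
  | nil => simp
  | cons h t ih =>
    simp only [List.foldl_cons, List.map_cons, List.sum_cons, ih]
    split_ifs <;> ring

theorem swgScore_eq (s : List Char) : swgScoreB (PySem.Chars.lower s) = swgScoreA s := by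
  rw [swgScoreA, swgScoreB, swgFoldl_ite_one (fun k => PySem.Chars.isIn k (PySem.Chars.lower s))]
  simp

theorem swgStep_eq (st : Option (List Char × Int) × Option (List Char × Int)) (raw : List Char) :
    swgStep st raw = match swgF raw with
      | none => st
      | some x => swgTop2 st x := by
  simp only [swgStep, swgF, swgTop2, swgScore_eq]
  split_ifs <;> rfl

theorem swgFoldl_step (l : List (List Char)) (st : Option (List Char × Int) × Option (List Char × Int)) :
    l.foldl swgStep st = (l.filterMap swgF).foldl swgTop2 st := by
  induction l generalizing st with
  | nil => rfl
  | cons h t ih =>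
    simp only [List.foldl_cons, List.filterMap_cons, swgStep_eq]
    cases hf : swgF h <;> simp only [ih, List.foldl_cons]

theorem swgImportant_eq (l : List (List Char)) (acc : List (List Char × Int)) :
    l.foldl (fun acc sentence =>
      let s := PySem.Chars.strip sentence
      if 10 < s.length then acc ++ [(s, swgScoreA s)] else acc) acc
    = acc ++ l.filterMap swgF := by
  induction l generalizing acc with
  | nil => simp
  | cons h t ih =>
    simp only [List.foldl_cons, List.filterMap_cons]
    have hf : swgF h = if 10 < (PySem.Chars.strip h).length then
        some (PySem.Chars.strip h, swgScoreA (PySem.Chars.strip h)) else none := rfl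
    rw [hf]
    by_cases hc : 10 < (PySem.Chars.strip h).length
    · rw [if_pos hc, ih]; simp [hc]
    · rw [if_neg hc, ih]; simp [hc]

-- inserting into a list touches its first two elements only through its first two elements
theorem take2_insertBy (p : (List Char × Int) → (List Char × Int) → Bool) (x : List Char × Int)
    (acc : List (List Char × Int)) :
    (PySem.List.insertBy p x acc).take 2 = (PySem.List.insertBy p x (acc.take 2)).take 2 := by
  match acc with
  | [] => rfl
  | [a] => rfl
  | a :: b :: t =>
    show (PySem.List.insertBy p x (a :: b :: t)).take 2 = (PySem.List.insertBy p x [a, b]).take 2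
    simp only [PySem.List.insertBy]
    split_ifs <;> simp

-- the streaming state is exactly the first two entries of the insertion-sorted accumulator
theorem swgTop2_foldl (m : List (List Char × Int))
    (st : Option (List Char × Int) × Option (List Char × Int)) (acc : List (List Char × Int))
    (h : swgStList st = acc.take 2) :
    swgStList (m.foldl swgTop2 st)
      = (m.foldl (fun acc x => PySem.List.insertBy (fun a b => decide (b.2 < a.2)) x acc) acc).take 2 := by
  induction m generalizing st acc with
  | nil => exact h
  | cons x t ih =>
    simp only [List.foldl_cons]
    refine ih _ _ ?_
    rw [take2_insertBy, ← h]
    rcases st with ⟨b?, s2?⟩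
    rcases b? with _ | b <;> rcases s2? with _ | s2 <;>
      simp [swgTop2, swgStList, PySem.List.insertBy] <;>
      split_ifs <;> simp

theorem swgTop2_sorted (m : List (List Char × Int)) :
    swgStList (m.foldl swgTop2 (none, none))
      = (PySem.List.sorted m (fun x => x.2) true).take 2 := by
  rw [PySem.List.sorted_rev_eq_foldl_insertBy]
  exact swgTop2_foldl m (none, none) [] rfl

theorem swgF_mem_long {x : List Char × Int} {l : List (List Char)} (hx : x ∈ l.filterMap swgF) :
    10 < x.1.length := by
  rcases List.mem_filterMap.mp hx with ⟨raw, _, hf⟩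
  simp only [swgF] at hf
  split_ifs at hf with hc
  cases hf; exact hc

-- the two ports agree on every input
theorem swg_main (text : String) (max_length : Int) :
    summarize_with_gemini text max_length = summarize_with_gemini_alt text max_length := by
  unfold summarize_with_gemini summarize_with_gemini_alt
  dsimp only
  rw [swgFoldl_step, swgImportant_eq, List.nil_append]
  have hst := swgTop2_sorted ((PySem.Chars.splitOn text.toList ['.']).filterMap swgF)
  set m := (PySem.Chars.splitOn text.toList ['.']).filterMap swgF with hm
  have hmem : ∀ x ∈ (PySem.List.sorted m (fun x => x.2) true).take 2, 10 < x.1.length := by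
    intro x hx
    exact swgF_mem_long ((PySem.List.mem_sorted _ _ _ _).mp (List.mem_of_mem_take hx))
  rcases hfold : m.foldl swgTop2 (none, none) with ⟨b?, s2?⟩
  rw [hfold] at hst
  rcases b? with _ | b
  · -- best is none: the top-2 list is empty, A's summary stays empty
    have h2 : (PySem.List.sorted m (fun x => x.2) true).take 2 = [] := by
      rcases s2? with _ | s2 <;> simpa [swgStList] using hst.symm
    simp [h2, swgBuild]
  · rcases s2? with _ | s2
    · -- exactly one admitted sentence
      have h2 : (PySem.List.sorted m (fun x => x.2) true).take 2 = [b] := by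
        simpa [swgStList] using hst.symm
      have hb : ¬ b.1.isEmpty := by
        have := hmem b (by rw [h2]; exact List.mem_singleton.mpr rfl)
        cases hb1 : b.1 with
        | nil => rw [hb1] at this; simp at this
        | cons c cs => simp
      rw [h2]
      by_cases hlen : ((b.1.length : Int) < max_length)
      · simp [swgBuild, hlen, hb]
      · simp [swgBuild, hlen]
    · -- two admitted sentences
      have h2 : (PySem.List.sorted m (fun x => x.2) true).take 2 = [b, s2] := by
        simpa [swgStList] using hst.symm
      have hb : ¬ b.1.isEmpty := by
        have := hmem b (by rw [h2]; simp)
        cases hb1 : b.1 with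
        | nil => rw [hb1] at this; simp at this
        | cons c cs => simp
      rw [h2]
      have hbne : b.1 ≠ [] := by
        intro he; rw [he] at hb; simp at hb
      by_cases hlen : ((b.1.length : Int) < max_length)
      · by_cases hlen2 : ((b.1.length : Int) + (s2.1.length : Int) < max_length) <;>
          simp [swgBuild, hlen, hlen2, hb, hbne, List.length_append]
      · simp [swgBuild, hlen]

-- ===== VERDICT (by name: the statement is the Claim_ definition above) =====
theorem summarize_with_gemini_spec : Claim_equal_summarize_with_gemini := by
  intro text max_length _
  unfold Spec_summarize_with_gemini
  exact swg_main text max_length
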